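-- pv_equiv track=rewrite | github.com/mnaderi98/Competitive-Programming-Spring-2023 | 855/B.py | has_common
-- ===== SOURCE A (Python) =====
-- def has_common(a, b):
--     x = 0
--     y = 0
--     z = 0
--     l = 0
--     for i in range(len(a) - 1):
--         for j in range(len(b) - 1):
--             if a[i] == b[j] and a[i+1] == b[j+1] and l <= 2:
--                 if l == 0:
--                     x = i
--                     y = j
--                 l += 2
--                 z += 1
--                 break
--         if z == 1:
--             break
--     return (x, y, l)
-- ===== SOURCE B (Python) =====
-- def has_common(a, b):
--     idx = {}
--     j = len(b) - 2
--     while j >= 0: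
--         idx[(b[j], b[j + 1])] = j
--         j -= 1
--     for i in range(len(a) - 1):
--         p = (a[i], a[i + 1])
--         if p in idx:
--             return (i, idx[p], 2)
--     return (0, 0, 0)
-- ===== Notes on version B (the rewrite author's own statement) =====
-- stated objective: faster
-- what changed: Replaces the nested scan of b for every i by a dict mapping each adjacent pair of b to its smallest index, built once, then a single pass over a.
import Mathlib
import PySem

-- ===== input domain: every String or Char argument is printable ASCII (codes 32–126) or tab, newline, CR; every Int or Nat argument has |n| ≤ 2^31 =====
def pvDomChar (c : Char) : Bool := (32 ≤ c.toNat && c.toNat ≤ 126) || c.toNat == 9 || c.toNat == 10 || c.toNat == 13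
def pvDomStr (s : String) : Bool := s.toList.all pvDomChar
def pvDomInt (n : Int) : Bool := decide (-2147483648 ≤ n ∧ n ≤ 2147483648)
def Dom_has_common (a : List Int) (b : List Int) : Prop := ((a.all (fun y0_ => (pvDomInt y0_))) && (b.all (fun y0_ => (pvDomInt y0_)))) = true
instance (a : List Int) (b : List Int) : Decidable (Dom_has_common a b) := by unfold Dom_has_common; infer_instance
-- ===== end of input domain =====

-- B replaces A's nested O(n*m) scan by a dict from each adjacent pair of b to its
-- smallest index (built once) plus a single pass over a (objective: faster, O(n+m)).

-- ===== PORT A =====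
-- inner loop `for j in range(len(b)-1): …` with state (x,y,z,l); break = return
def aInner (a b : List Int) (i : Nat) (x y z l : Int) (j : Nat) : Int × Int × Int × Int :=
  if _h : j + 1 < b.length then
    if a.getD i 0 = b.getD j 0 ∧ a.getD (i+1) 0 = b.getD (j+1) 0 ∧ l ≤ 2 then
      if l = 0 then ((i : Int), (j : Int), z + 1, l + 2)
      else (x, y, z + 1, l + 2)
    else aInner a b i x y z l (j+1)
  else (x, y, z, l)
termination_by b.length - j

-- outer loop `for i in range(len(a)-1): …`; `if z == 1: break`
def aOuter (a b : List Int) (x y z l : Int) (i : Nat) : Int × Int × Int × Int :=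
  if _h : i + 1 < a.length then
    match aInner a b i x y z l 0 with
    | (x', y', z', l') => if z' = 1 then (x', y', z', l') else aOuter a b x' y' z' l' (i+1)
  else (x, y, z, l)
termination_by a.length - i

def has_common (a : List Int) (b : List Int) : Int × Int × Int :=
  match aOuter a b 0 0 0 0 0 with
  | (x, y, _, l) => (x, y, l)

-- ===== PORT B =====
-- the adjacent pair (xs[j], xs[j+1])
def pairAt (xs : List Int) (j : Nat) : Int × Int := (xs.getD j 0, xs.getD (j+1) 0)

-- `while j >= 0: idx[(b[j], b[j+1])] = j; j -= 1`, fuel = j + 1 (number of remaining indices)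
def buildIdx (b : List Int) (d : PySem.Dict (Int × Int) Int) : Nat → PySem.Dict (Int × Int) Int
  | 0 => d
  | j+1 => buildIdx b (d.insert (pairAt b j) (j : Int)) j

-- `for i in range(len(a)-1): …  return (i, idx[p], 2)`
def altScan (a : List Int) (idx : PySem.Dict (Int × Int) Int) (i : Nat) : Int × Int × Int :=
  if _h : i + 1 < a.length then
    match idx.get? (pairAt a i) with
    | some j => ((i : Int), j, 2)
    | none => altScan a idx (i+1)
  else (0, 0, 0)
termination_by a.length - i

def has_common_alt (a : List Int) (b : List Int) : Int × Int × Int :=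
  altScan a (buildIdx b PySem.Dict.empty (b.length - 1)) 0

-- ===== PRECONDITION & SPEC =====
def Spec_has_common (a : List Int) (b : List Int) (out : Int × Int × Int) : Prop := out = has_common_alt a b
instance (a : List Int) (b : List Int) (out : Int × Int × Int) : Decidable (Spec_has_common a b out) := by unfold Spec_has_common; infer_instance

-- ===== CLAIM (what is proved, stated in full; the proofs are below) =====
def Claim_equal_has_common : Prop := ∀ (a : List Int) (b : List Int), Dom_has_common a b → Spec_has_common a b (has_common a b)

-- ===== LEMMAS AND PROOFS =====

-- first j with j+1 < b.length and pairAt b j = p, searching upward from j (shape of A's inner loop)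
def upFirst (b : List Int) (p : Int × Int) (j : Nat) : Option Nat :=
  if h : j + 1 < b.length then
    if pairAt b j = p then some j else upFirst b p (j+1)
  else none
termination_by b.length - j

-- smallest k < j with pairAt b k = p (shape of B's dict build, low index wins)
def specJ (b : List Int) (p : Int × Int) : Nat → Option Nat
  | 0 => none
  | j+1 => match specJ b p j with
    | some k => some k
    | none => if pairAt b j = p then some j else none

theorem upFirst_eq_find? (b : List Int) (p : Int × Int) :
    ∀ j, upFirst b p j = (List.range' j (b.length - 1 - j)).find? (fun k => decide (pairAt b k = p)) := by
  intro j
  induction hn : b.length - 1 - j generalizing j with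
  | zero =>
    rw [upFirst]
    have : ¬ j + 1 < b.length := by omega
    simp [this]
  | succ n ih =>
    rw [upFirst]
    have hlt : j + 1 < b.length := by omega
    rw [dif_pos hlt, List.range'_succ, List.find?_cons]
    by_cases hp : pairAt b j = p
    · simp [hp]
    · rw [if_neg hp, ih (j+1) (by omega)]
      simp [hp]

theorem specJ_eq_find? (b : List Int) (p : Int × Int) :
    ∀ j, specJ b p j = (List.range j).find? (fun k => decide (pairAt b k = p)) := by
  intro j
  induction j with
  | zero => simp [specJ]
  | succ j ih =>
    rw [specJ, ih, List.range_succ, List.find?_append]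
    cases h : (List.range j).find? (fun k => decide (pairAt b k = p)) with
    | some k => simp
    | none =>
      by_cases hp : pairAt b j = p <;> simp [hp, Option.or]

theorem upFirst_eq_specJ (b : List Int) (p : Int × Int) :
    upFirst b p 0 = specJ b p (b.length - 1) := by
  rw [upFirst_eq_find?, specJ_eq_find?, List.range_eq_range']
  simp

theorem buildIdx_get? (b : List Int) (p : Int × Int) :
    ∀ j d, (buildIdx b d j).get? p =
      (match specJ b p j with
       | some k => some ((k : Nat) : Int)
       | none => d.get? p) := by
  intro j
  induction j with
  | zero => intro d; simp [buildIdx, specJ]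
  | succ j ih =>
    intro d
    rw [buildIdx, ih, specJ]
    cases h : specJ b p j with
    | some k => simp
    | none =>
      by_cases hp : pairAt b j = p
      · simp [hp, PySem.Dict.get?_insert_self]
      · rw [if_neg hp, PySem.Dict.get?_insert_of_ne _ _ (fun he => hp he.symm)]

theorem aInner_zero (a b : List Int) (i : Nat) :
    ∀ j x y, aInner a b i x y 0 0 j =
      (match upFirst b (pairAt a i) j with
       | some k => ((i : Int), (k : Int), 1, 2)
       | none => (x, y, 0, 0)) := by
  intro j
  induction hn : b.length - j generalizing j with
  | zero =>
    intro x y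
    rw [aInner, upFirst]
    have : ¬ j + 1 < b.length := by omega
    simp [this]
  | succ n ih =>
    intro x y
    rw [aInner, upFirst]
    by_cases hlt : j + 1 < b.length
    · rw [dif_pos hlt, dif_pos hlt]
      by_cases hp : pairAt b j = pairAt a i
      · simp only [pairAt, Prod.mk.injEq] at hp
        rw [if_pos ⟨hp.1.symm, hp.2.symm, by norm_num⟩, if_pos rfl,
            if_pos (by simp only [pairAt, Prod.mk.injEq]; exact hp)]
        norm_num
      · have hc : ¬ (a.getD i 0 = b.getD j 0 ∧ a.getD (i+1) 0 = b.getD (j+1) 0 ∧ (0:Int) ≤ 2) := by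
          intro ⟨h1, h2, _⟩
          exact hp (by simp only [pairAt, Prod.mk.injEq]; exact ⟨h1.symm, h2.symm⟩)
        rw [if_neg hc, if_neg hp]
        exact ih (j+1) (by omega) x y
    · rw [dif_neg hlt, dif_neg hlt]

theorem aOuter_eq_altScan (a b : List Int) :
    ∀ i, (match aOuter a b 0 0 0 0 i with
          | (x, y, _, l) => (x, y, l)) =
         altScan a (buildIdx b PySem.Dict.empty (b.length - 1)) i := by
  intro i
  induction hn : a.length - i generalizing i with
  | zero =>
    rw [aOuter, altScan]
    have : ¬ i + 1 < a.length := by omega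
    simp [this]
  | succ n ih =>
    rw [aOuter, altScan]
    by_cases hlt : i + 1 < a.length
    · simp only [hlt, dif_pos]
      rw [aInner_zero]
      rw [buildIdx_get?, ← upFirst_eq_specJ]
      cases h : upFirst b (pairAt a i) 0 with
      | some k => simp
      | none =>
        exact ih (i+1) (by omega)
    · simp [hlt]

-- ===== VERDICT (by name: the statement is the Claim_ definition above) =====
theorem has_common_spec : Claim_equal_has_common := by
  intro a b _
  unfold Spec_has_common has_common has_common_alt
  exact aOuter_eq_altScan a b 0
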